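-- pv_equiv track=rewrite | github.com/Divyakush2006/Project--Resume-checker-and-anhancer-using-machine-learning- | resume_parser.py | compare_skills
-- ===== SOURCE A (Python) =====
-- def compare_skills(resume_skills, job_description_skills):
--     """
--     Compares skills from a resume against skills from a job description.
--     Args:
--         resume_skills (list): Skills extracted from the resume.
--         job_description_skills (list): Skills extracted from the job description.
--     Returns:
--         dict: A dictionary containing:
--             - 'matched_skills': Skills present in both.
--             - 'missing_skills': Skills in JD but not in resume.
--             - 'extra_skills': Skills in resume but not in JD.
--     """
--     # Convert to lowercase sets for case-insensitive comparison
--     resume_set = set(s.lower() for s in resume_skills)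
--     jd_set = set(s.lower() for s in job_description_skills)
--
--     matched_skills = sorted(list(resume_set.intersection(jd_set)))
--     missing_skills = sorted(list(jd_set.difference(resume_set)))
--     extra_skills = sorted(list(resume_set.difference(jd_set)))
--
--     # Return original casing if desired, or keep lowercase for consistency.
--     # For display, converting back to original casing (if available in a map) might be nice.
--     # For now, we'll return the lowercased matches.
--     return {
--         "matched_skills": matched_skills,
--         "missing_skills": missing_skills,
--         "extra_skills": extra_skills
--     }
-- ===== SOURCE B (Python) =====
-- def compare_skills(resume_skills, job_description_skills):
--     # One presence table: lowered skill -> (in_resume, in_jd); classify in a single pass.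
--     presence = {}
--     for s in resume_skills:
--         k = s.lower()
--         presence[k] = (True, presence.get(k, (False, False))[1])
--     for s in job_description_skills:
--         k = s.lower()
--         presence[k] = (presence.get(k, (False, False))[0], True)
--     matched, missing, extra = [], [], []
--     for k, (in_resume, in_jd) in presence.items():
--         if in_resume and in_jd:
--             matched.append(k)
--         elif in_jd:
--             missing.append(k)
--         else:
--             extra.append(k)
--     matched.sort()
--     missing.sort()
--     extra.sort()
--     return {
--         "matched_skills": matched,
--         "missing_skills": missing,
--         "extra_skills": extra
--     }
-- ===== Notes on version B (the rewrite author's own statement) =====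
-- stated objective: alternative
-- what changed: Replaces A's set intersection/difference algebra by a single presence table mapping each lowercased skill to a (in_resume, in_jd) flag pair, filled in two marking passes and classified into the three lists in one pass over the table.
import Mathlib
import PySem

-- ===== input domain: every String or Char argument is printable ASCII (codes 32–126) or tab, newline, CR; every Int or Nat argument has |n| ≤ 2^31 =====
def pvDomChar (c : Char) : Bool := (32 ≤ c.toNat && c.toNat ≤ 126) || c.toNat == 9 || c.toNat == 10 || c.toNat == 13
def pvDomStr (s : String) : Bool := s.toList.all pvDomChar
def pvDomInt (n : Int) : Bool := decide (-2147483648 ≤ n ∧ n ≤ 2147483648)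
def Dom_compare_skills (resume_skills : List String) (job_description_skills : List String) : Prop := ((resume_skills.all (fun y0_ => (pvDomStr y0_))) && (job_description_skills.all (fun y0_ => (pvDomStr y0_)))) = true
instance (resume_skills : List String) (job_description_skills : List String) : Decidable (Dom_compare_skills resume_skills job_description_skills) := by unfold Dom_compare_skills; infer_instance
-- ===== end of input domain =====

-- B replaces A's set intersection/difference algebra by one presence table (lowered skill ↦ two flags)
-- filled in two marking passes and classified in a single pass; objective: alternative decomposition, same cost.

-- ===== PORT A =====
def compare_skills (resume_skills : List String) (job_description_skills : List String) : List (String × List String) :=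
  let resume_set : PySem.Set String := PySem.Set.ofList (resume_skills.map (fun s => PySem.Str.lower s))
  let jd_set : PySem.Set String := PySem.Set.ofList (job_description_skills.map (fun s => PySem.Str.lower s))
  let matched_skills := PySem.List.sorted (PySem.Set.inter resume_set jd_set) (fun x => x) false
  let missing_skills := PySem.List.sorted (PySem.Set.diff jd_set resume_set) (fun x => x) false
  let extra_skills := PySem.List.sorted (PySem.Set.diff resume_set jd_set) (fun x => x) false
  [("matched_skills", matched_skills), ("missing_skills", missing_skills), ("extra_skills", extra_skills)]

-- ===== PORT B =====
-- presence[k] = (True, presence.get(k, (False, False))[1])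
def csStep1 (d : PySem.Dict String (Bool × Bool)) (k : String) : PySem.Dict String (Bool × Bool) :=
  d.insert k (true, (d.getD k (false, false)).2)
def csMarkResume (d : PySem.Dict String (Bool × Bool)) (s : String) : PySem.Dict String (Bool × Bool) :=
  csStep1 d (PySem.Str.lower s)
-- presence[k] = (presence.get(k, (False, False))[0], True)
def csStep2 (d : PySem.Dict String (Bool × Bool)) (k : String) : PySem.Dict String (Bool × Bool) :=
  d.insert k ((d.getD k (false, false)).1, true)
def csMarkJd (d : PySem.Dict String (Bool × Bool)) (s : String) : PySem.Dict String (Bool × Bool) :=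
  csStep2 d (PySem.Str.lower s)
-- the classifying pass over presence.items()
def csClassify (acc : List String × List String × List String) (kv : String × (Bool × Bool)) :
    List String × List String × List String :=
  if kv.2.1 && kv.2.2 then (acc.1 ++ [kv.1], acc.2.1, acc.2.2)
  else if kv.2.2 then (acc.1, acc.2.1 ++ [kv.1], acc.2.2)
  else (acc.1, acc.2.1, acc.2.2 ++ [kv.1])

def compare_skills_alt (resume_skills : List String) (job_description_skills : List String) : List (String × List String) :=
  let presence := job_description_skills.foldl csMarkJd (resume_skills.foldl csMarkResume PySem.Dict.empty)
  let acc := presence.items.foldl csClassify ([], [], [])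
  [("matched_skills", PySem.List.sorted acc.1 (fun x => x) false),
   ("missing_skills", PySem.List.sorted acc.2.1 (fun x => x) false),
   ("extra_skills", PySem.List.sorted acc.2.2 (fun x => x) false)]

-- ===== PRECONDITION & SPEC =====
def Spec_compare_skills (resume_skills : List String) (job_description_skills : List String) (out : List (String × List String)) : Prop := out = compare_skills_alt resume_skills job_description_skills
instance (resume_skills : List String) (job_description_skills : List String) (out : List (String × List String)) : Decidable (Spec_compare_skills resume_skills job_description_skills out) := by unfold Spec_compare_skills; infer_instance

-- ===== CLAIM (what is proved, stated in full; the proofs are below) =====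
def Claim_equal_compare_skills : Prop := ∀ (resume_skills : List String) (job_description_skills : List String), Dom_compare_skills resume_skills job_description_skills → Spec_compare_skills resume_skills job_description_skills (compare_skills resume_skills job_description_skills)

-- ===== LEMMAS AND PROOFS =====

-- the shape of B's presence table: an association list over a nodup key list, values given by two flag functions
def csItems (s : List String) (f g : String → Bool) : List (String × (Bool × Bool)) :=
  s.map (fun k => (k, (f k, g k)))

theorem csItems_find? (s : List String) (f g : String → Bool) (k : String) :
    List.find? (fun p => p.1 == k) (csItems s f g) =
      if k ∈ s then some (k, (f k, g k)) else none := by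
  induction s with
  | nil => simp [csItems]
  | cons a t ih =>
    by_cases h : a = k
    · subst h; simp [csItems]
    · simp [csItems, List.find?, beq_iff_eq, h, Ne.symm h] at *
      simpa [csItems] using ih

theorem csItems_contains (s : List String) (f g : String → Bool) (k : String) :
    (PySem.Dict.mk (csItems s f g)).contains k = decide (k ∈ s) := by
  simp [PySem.Dict.contains, csItems, List.any_map, Function.comp, beq_iff_eq]
  by_cases h : k ∈ s
  · simpa [h] using ⟨k, h, rfl⟩
  · simp [h]; intro x hx hxk; exact h (hxk ▸ hx)

theorem csItems_getD (s : List String) (f g : String → Bool) (k : String) :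
    (PySem.Dict.mk (csItems s f g)).getD k (false, false) =
      if k ∈ s then (f k, g k) else (false, false) := by
  simp [PySem.Dict.getD, PySem.Dict.get?, csItems_find?]
  by_cases h : k ∈ s <;> simp [h]

-- loop 2 invariant (mark every lowered jd skill in the second flag)
theorem csLoop2_inv (L : List String) (s : PySem.Set String) (f g : String → Bool)
    (hs : s.Nodup) :
    L.foldl csStep2 (PySem.Dict.mk (csItems s f g)) =
      PySem.Dict.mk (csItems (s.update L)
        (fun k => if k ∈ s then f k else false)
        (fun k => if k ∈ L then true else g k)) := by
  induction L generalizing s f g with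
  | nil =>
    simp only [List.foldl_nil, PySem.Set.update, csItems]
    congr 1
    exact List.map_congr_left (fun k hk => by simp [hk])
  | cons a L ih =>
    have hstep : csStep2 (PySem.Dict.mk (csItems s f g)) a =
        PySem.Dict.mk (csItems (s.add a)
          (fun k => if k = a then (if a ∈ s then f a else false) else f k)
          (fun k => if k = a then true else g k)) := by
      by_cases h : a ∈ s
      · have hadd : s.add a = s := by simp [PySem.Set.add, PySem.Set.contains, List.contains_iff_mem, h]
        simp only [csStep2, PySem.Dict.insert, csItems_contains, csItems_getD, h, decide_true,
          if_true, hadd]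
        congr 1
        simp only [csItems, List.map_map]
        refine List.map_congr_left (fun k hk => ?_)
        by_cases hk' : k = a
        · subst hk'; simp [h]
        · simp [hk', beq_iff_eq]
      · have hadd : s.add a = s ++ [a] := by simp [PySem.Set.add, PySem.Set.contains, List.contains_iff_mem, h]
        simp only [csStep2, PySem.Dict.insert, csItems_contains, csItems_getD, h, decide_false,
          Bool.false_eq_true, if_false, hadd]
        congr 1
        simp only [csItems, List.map_append, List.map_cons, List.map_nil]
        refine congrArg₂ _ (List.map_congr_left (fun k hk => ?_)) (by simp)
        have hk' : k ≠ a := fun he => h (he ▸ hk)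
        simp [hk']
    rw [List.foldl_cons, hstep,
      ih (s.add a) _ _ (PySem.Set.nodup_add s a hs)]
    have hupd : s.update (a :: L) = (s.add a).update L := rfl
    rw [hupd]
    congr 1
    refine List.map_congr_left (fun k hk => ?_)
    by_cases hka : k = a
    · subst hka
      by_cases hks : k ∈ s <;> by_cases hkL : k ∈ L <;>
        simp [PySem.Set.mem_add, hks, hkL]
    · by_cases hks : k ∈ s <;> by_cases hkL : k ∈ L <;>
        simp [PySem.Set.mem_add, hks, hkL, hka]

-- loop 1 invariant (mark every lowered resume skill in the first flag)
theorem csLoop1_inv (L : List String) (s : PySem.Set String) (f g : String → Bool)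
    (hs : s.Nodup) :
    L.foldl csStep1 (PySem.Dict.mk (csItems s f g)) =
      PySem.Dict.mk (csItems (s.update L)
        (fun k => if k ∈ L then true else f k)
        (fun k => if k ∈ s then g k else false)) := by
  induction L generalizing s f g with
  | nil =>
    simp only [List.foldl_nil, PySem.Set.update, csItems]
    congr 1
    exact List.map_congr_left (fun k hk => by simp [hk])
  | cons a L ih =>
    have hstep : csStep1 (PySem.Dict.mk (csItems s f g)) a =
        PySem.Dict.mk (csItems (s.add a)
          (fun k => if k = a then true else f k)
          (fun k => if k = a then (if a ∈ s then g a else false) else g k)) := by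
      by_cases h : a ∈ s
      · have hadd : s.add a = s := by simp [PySem.Set.add, PySem.Set.contains, List.contains_iff_mem, h]
        simp only [csStep1, PySem.Dict.insert, csItems_contains, csItems_getD, h, decide_true,
          if_true, hadd]
        congr 1
        simp only [csItems, List.map_map]
        refine List.map_congr_left (fun k hk => ?_)
        by_cases hk' : k = a
        · subst hk'; simp [h]
        · simp [hk', beq_iff_eq]
      · have hadd : s.add a = s ++ [a] := by simp [PySem.Set.add, PySem.Set.contains, List.contains_iff_mem, h]
        simp only [csStep1, PySem.Dict.insert, csItems_contains, csItems_getD, h, decide_false,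
          Bool.false_eq_true, if_false, hadd]
        congr 1
        simp only [csItems, List.map_append, List.map_cons, List.map_nil]
        refine congrArg₂ _ (List.map_congr_left (fun k hk => ?_)) (by simp)
        have hk' : k ≠ a := fun he => h (he ▸ hk)
        simp [hk']
    rw [List.foldl_cons, hstep,
      ih (s.add a) _ _ (PySem.Set.nodup_add s a hs)]
    have hupd : s.update (a :: L) = (s.add a).update L := rfl
    rw [hupd]
    congr 1
    refine List.map_congr_left (fun k hk => ?_)
    by_cases hka : k = a
    · subst hka
      by_cases hks : k ∈ s <;> by_cases hkL : k ∈ L <;>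
        simp [PySem.Set.mem_add, hks, hkL]
    · by_cases hks : k ∈ s <;> by_cases hkL : k ∈ L <;>
        simp [PySem.Set.mem_add, hks, hkL, hka]

-- the classifying pass is three filters of the key list
theorem csClassify_spec (U : List String) (p q : String → Bool)
    (m mi e : List String) :
    (csItems U p q).foldl csClassify (m, mi, e) =
      (m ++ U.filter (fun k => p k && q k),
       mi ++ U.filter (fun k => !p k && q k),
       e ++ U.filter (fun k => !q k)) := by
  induction U generalizing m mi e with
  | nil => simp [csItems]
  | cons a U ih =>
    cases hp : p a <;> cases hq : q a <;>
      simp [csItems, csClassify, hp, hq, List.filter_cons] at * <;>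
      simp [ih]

-- membership-and-nodup ⇒ the sorted lists agree
theorem csSorted_eq {xs ys : List String} (hx : xs.Nodup) (hy : ys.Nodup)
    (h : ∀ a, a ∈ xs ↔ a ∈ ys) :
    PySem.List.sorted xs (fun x => x) false = PySem.List.sorted ys (fun x => x) false :=
  (PySem.List.sorted_id_eq_sorted_id_iff_perm xs ys).mpr
    ((List.perm_ext_iff_of_nodup hx hy).mpr h)

theorem csMark1_eq (l : List String) (d : PySem.Dict String (Bool × Bool)) :
    l.foldl csMarkResume d = (l.map (fun s => PySem.Str.lower s)).foldl csStep1 d := by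
  rw [List.foldl_map]; rfl

theorem csMark2_eq (l : List String) (d : PySem.Dict String (Bool × Bool)) :
    l.foldl csMarkJd d = (l.map (fun s => PySem.Str.lower s)).foldl csStep2 d := by
  rw [List.foldl_map]; rfl

-- abbreviations for B's closed form (proof-side only)
def csLow (l : List String) : List String := l.map (fun s => PySem.Str.lower s)
def csU (r j : List String) : List String := (PySem.Set.ofList (csLow r)).update (csLow j)
def csP (r : List String) (k : String) : Bool := decide (k ∈ csLow r)
def csQ (j : List String) (k : String) : Bool := decide (k ∈ csLow j)

theorem csU_mem (r j : List String) (a : String) : a ∈ csU r j ↔ a ∈ csLow r ∨ a ∈ csLow j := by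
  rw [csU, PySem.Set.mem_update, PySem.Set.mem_ofList]

theorem csU_nodup (r j : List String) : (csU r j).Nodup :=
  PySem.Set.nodup_update _ _ (PySem.Set.nodup_ofList _)

-- B in closed form: three filters of the presence-key list, sorted
theorem csAlt_eq (r j : List String) :
    compare_skills_alt r j =
      [("matched_skills", PySem.List.sorted ((csU r j).filter (fun k => csP r k && csQ j k)) (fun x => x) false),
       ("missing_skills", PySem.List.sorted ((csU r j).filter (fun k => !csP r k && csQ j k)) (fun x => x) false),
       ("extra_skills", PySem.List.sorted ((csU r j).filter (fun k => !csQ j k)) (fun x => x) false)] := by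
  unfold compare_skills_alt
  rw [csMark1_eq, csMark2_eq,
    show (PySem.Dict.empty : PySem.Dict String (Bool × Bool)) =
      PySem.Dict.mk (csItems [] (fun _ => false) (fun _ => false)) from rfl,
    csLoop1_inv _ _ _ _ List.nodup_nil]
  have hnodup : (PySem.Set.update ([] : PySem.Set String) (r.map (fun s => PySem.Str.lower s))).Nodup :=
    PySem.Set.nodup_ofList (r.map (fun s => PySem.Str.lower s))
  rw [csLoop2_inv _ _ _ _ hnodup]
  simp only []
  rw [csClassify_spec]
  simp only [List.nil_append]
  have hU : PySem.Set.update (PySem.Set.update ([] : PySem.Set String) (r.map (fun s => PySem.Str.lower s)))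
      (j.map (fun s => PySem.Str.lower s)) = csU r j := rfl
  rw [hU]
  have hP : ∀ (k : String),
      (if k ∈ PySem.Set.update ([] : PySem.Set String) (r.map (fun s => PySem.Str.lower s)) then
        (if k ∈ r.map (fun s => PySem.Str.lower s) then true else false) else false) = csP r k := by
    intro k
    have hiff : k ∈ PySem.Set.update ([] : PySem.Set String) (r.map (fun s => PySem.Str.lower s)) ↔
        k ∈ csLow r := by
      rw [PySem.Set.mem_update]; simp [csLow]
    by_cases hk : k ∈ csLow r <;> simp [csP, hk, hiff, csLow] at *
  have hQ : ∀ (k : String), (if k ∈ j.map (fun s => PySem.Str.lower s) then true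
      else if k ∈ ([] : List String) then false else false) = csQ j k := by
    intro k; by_cases hk : k ∈ csLow j <;> simp [csQ, hk, csLow] at *
  simp only [hP, hQ]

-- ===== VERDICT (by name: the statement is the Claim_ definition above) =====
theorem compare_skills_spec : Claim_equal_compare_skills := by
  intro r j _
  unfold Spec_compare_skills
  rw [csAlt_eq]
  unfold compare_skills
  have hnR : (PySem.Set.ofList (csLow r)).Nodup := PySem.Set.nodup_ofList _
  have hnJ : (PySem.Set.ofList (csLow j)).Nodup := PySem.Set.nodup_ofList _
  have hmatched :
      PySem.List.sorted (PySem.Set.inter (PySem.Set.ofList (csLow r)) (PySem.Set.ofList (csLow j))) (fun x => x) false =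
      PySem.List.sorted ((csU r j).filter (fun k => csP r k && csQ j k)) (fun x => x) false := by
    refine csSorted_eq (hnR.filter _) ((csU_nodup r j).filter _) ?_
    intro a
    simp only [List.mem_filter, PySem.Set.mem_inter, PySem.Set.mem_ofList, csU_mem, csP, csQ,
      Bool.and_eq_true, Bool.not_eq_eq_eq_not, Bool.not_true, decide_eq_true_eq,
      decide_eq_false_iff_not]
    tauto
  have hmissing :
      PySem.List.sorted (PySem.Set.diff (PySem.Set.ofList (csLow j)) (PySem.Set.ofList (csLow r))) (fun x => x) false =
      PySem.List.sorted ((csU r j).filter (fun k => !csP r k && csQ j k)) (fun x => x) false := by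
    refine csSorted_eq (hnJ.filter _) ((csU_nodup r j).filter _) ?_
    intro a
    simp only [List.mem_filter, PySem.Set.mem_diff, PySem.Set.mem_ofList, csU_mem, csP, csQ,
      Bool.and_eq_true, Bool.not_eq_eq_eq_not, Bool.not_true, decide_eq_true_eq,
      decide_eq_false_iff_not]
    tauto
  have hextra :
      PySem.List.sorted (PySem.Set.diff (PySem.Set.ofList (csLow r)) (PySem.Set.ofList (csLow j))) (fun x => x) false =
      PySem.List.sorted ((csU r j).filter (fun k => !csQ j k)) (fun x => x) false := by
    refine csSorted_eq (hnR.filter _) ((csU_nodup r j).filter _) ?_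
    intro a
    simp only [List.mem_filter, PySem.Set.mem_diff, PySem.Set.mem_ofList, csU_mem, csP, csQ,
      Bool.and_eq_true, Bool.not_eq_eq_eq_not, Bool.not_true, decide_eq_true_eq,
      decide_eq_false_iff_not]
    tauto
  show [("matched_skills", PySem.List.sorted (PySem.Set.inter (PySem.Set.ofList (csLow r)) (PySem.Set.ofList (csLow j))) (fun x => x) false),
        ("missing_skills", PySem.List.sorted (PySem.Set.diff (PySem.Set.ofList (csLow j)) (PySem.Set.ofList (csLow r))) (fun x => x) false),
        ("extra_skills", PySem.List.sorted (PySem.Set.diff (PySem.Set.ofList (csLow r)) (PySem.Set.ofList (csLow j))) (fun x => x) false)] = _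
  rw [hmatched, hmissing, hextra]
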